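-- pv_equiv track=rewrite | github.com/Curtis-Lau/LinUCB-Based-on-Decision-Tree | tree_C45.py | cut_leaf
-- ===== SOURCE A (Python) =====
-- import operator
--
-- def cut_leaf(item,value):
--     item_label=[]
--     for dataSet in item[:]:
--         classList=[example[-1] for example in dataSet]  # 类别向量
--         classCount={}
--         for vote in classList:
--             if vote not in classCount.keys(): classCount[vote] = 0   #未出现过，生成一个键值对
--             classCount[vote] += 1
--         sortedClassCount = sorted(classCount.items(), key=operator.itemgetter(1), reverse=True) #classCount.iteritems()python3中已经没有这个属性，直接改为items
--         item_label.append(sortedClassCount[0][0])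
--     m = find_all_index(item_label,value)  #查找出现value最多的组合在item中的位置
--     for j in m[::-1]:
--         del item[j]
--     return item
--
-- def find_all_index(arr,value):  #找到满足list中某个固定值的所有位置
--     return [i for i,a in enumerate(arr) if a==value]
-- ===== SOURCE B (Python) =====
-- # Dict-free and sort-free: the majority label is found by a left-to-right scan using
-- # list.count (first label whose total count is strictly larger wins, which is exactly
-- # A's insertion-order tie-break); survivors are collected and written back in place.
-- def cut_leaf(item, value):
--     survivors = []
--     for dataSet in item:
--         labels = [example[-1] for example in dataSet]
--         best = labels[0]
--         best_count = labels.count(best)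
--         for lab in labels:
--             c = labels.count(lab)
--             if c > best_count:
--                 best, best_count = lab, c
--         if best != value:
--             survivors.append(dataSet)
--     item[:] = survivors
--     return item
-- ===== Notes on version B (the rewrite author's own statement) =====
-- stated objective: alternative
-- what changed: Drops A's per-dataset counting dict, sort and find_all_index/reverse-delete phases: B finds each dataset's majority label by a plain left-to-right scan with list.count (first strictly larger total count wins, reproducing A's insertion-order tie-break) and rebuilds item in place from the survivors in one pass.
import Mathlib
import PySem

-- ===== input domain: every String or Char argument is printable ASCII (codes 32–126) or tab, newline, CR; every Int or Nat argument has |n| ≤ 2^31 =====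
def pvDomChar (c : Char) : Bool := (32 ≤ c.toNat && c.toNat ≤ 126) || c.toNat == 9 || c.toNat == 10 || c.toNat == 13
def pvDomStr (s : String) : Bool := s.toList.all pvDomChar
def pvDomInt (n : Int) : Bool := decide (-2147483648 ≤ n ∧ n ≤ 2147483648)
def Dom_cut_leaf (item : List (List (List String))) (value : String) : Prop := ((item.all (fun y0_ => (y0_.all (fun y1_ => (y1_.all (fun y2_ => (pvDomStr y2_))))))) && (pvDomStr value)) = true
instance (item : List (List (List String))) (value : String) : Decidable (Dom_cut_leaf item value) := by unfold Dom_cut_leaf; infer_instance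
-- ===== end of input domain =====

-- B drops A's counting dict, sort and find_all_index/reverse-delete phases: it finds each
-- majority label by a count-scan (first strictly larger total count wins) and rebuilds item
-- in place from the survivors; both Pythons mutate `item` to the same final contents, so
-- return-value equivalence covers the side effect too.

-- ===== PORT A =====
-- A's helper find_all_index (enumerate + filter on the value, keep the indices)
def find_all_index (arr : List String) (value : String) : List Int :=
  ((PySem.List.enumerate arr 0).filter (fun p => p.2 == value)).map (·.1)

def cut_leaf (item : List (List (List String))) (value : String) : List (List (List String)) :=
  let item_label := item.foldl (fun acc dataSet =>
      let classList := dataSet.map (fun ex => (PySem.List.pyGet? ex (-1)).getD "")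
      let classCount := classList.foldl (fun d vote =>
          (if d.contains vote then d else d.insert vote 0).modify vote 0 (· + 1))
        (PySem.Dict.mk ([] : List (String × Int)))
      let sortedClassCount := PySem.List.sorted classCount.items (fun p => p.2) true
      acc ++ [((PySem.List.pyGet? sortedClassCount 0).getD ("", 0)).1]) []
  let m := find_all_index item_label value
  ((PySem.List.slice? m none none (-1)).getD []).foldl
    (fun cur j => cur.eraseIdx j.toNat) item

-- ===== PORT B =====
-- B's inner loop: scan the label list left to right, keeping the first label whose
-- total count (labels.count) is strictly larger than the best so far
def pvMajorityB (dataSet : List (List String)) : String :=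
  let labels := dataSet.map (fun ex => (PySem.List.pyGet? ex (-1)).getD "")
  let best0 := (PySem.List.pyGet? labels 0).getD ""
  (labels.foldl (fun st lab =>
      let c := PySem.List.count labels lab
      if st.2 < c then (lab, c) else st) (best0, PySem.List.count labels best0)).1

def cut_leaf_alt (item : List (List (List String))) (value : String) : List (List (List String)) :=
  item.foldl (fun survivors dataSet =>
    if pvMajorityB dataSet != value then survivors ++ [dataSet] else survivors) []

-- ===== PRECONDITION & SPEC =====
-- Pre_ excludes exactly the inputs where Python A raises: an empty dataSet (sortedClassCount[0]
-- is an IndexError) or an empty example (example[-1] is an IndexError); B raises there too.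
def Pre_cut_leaf (item : List (List (List String))) (value : String) : Prop :=
  ∀ ds ∈ item, ds ≠ [] ∧ ∀ ex ∈ ds, ex ≠ []
instance (item : List (List (List String))) (value : String) : Decidable (Pre_cut_leaf item value) := by unfold Pre_cut_leaf; infer_instance

def pvWitness_cut_leaf : List (List (List String)) × String :=
  ([[["x", "a"], ["b"]], [["a"]]], "a")

def Spec_cut_leaf (item : List (List (List String))) (value : String) (out : List (List (List String))) : Prop := out = cut_leaf_alt item value
instance (item : List (List (List String))) (value : String) (out : List (List (List String))) : Decidable (Spec_cut_leaf item value out) := by unfold Spec_cut_leaf; infer_instance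

-- ===== CLAIM (what is proved, stated in full; the proofs are below) =====
def Claim_equal_cut_leaf : Prop := ∀ (item : List (List (List String))) (value : String), Dom_cut_leaf item value → Pre_cut_leaf item value → Spec_cut_leaf item value (cut_leaf item value)

-- ===== LEMMAS AND PROOFS =====

-- A's per-dataset label (the body of A's first loop)
def pvLabelA (dataSet : List (List String)) : String :=
  let classList := dataSet.map (fun ex => (PySem.List.pyGet? ex (-1)).getD "")
  let classCount := classList.foldl (fun d vote =>
      (if d.contains vote then d else d.insert vote 0).modify vote 0 (· + 1))
    (PySem.Dict.mk ([] : List (String × Int)))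
  ((PySem.List.pyGet? (PySem.List.sorted classCount.items (fun p => p.2) true) 0).getD ("", 0)).1

-- the step of PySem.List.max? (running first-max); max? xs key = xs.foldl (pvMaxStep key) none
def pvMaxStep {α : Type} (key : α → Int) (acc : Option α) (x : α) : Option α :=
  match acc with
  | none => some x
  | some m => if key m < key x then some x else some m

-- A's counting step (setdefault-0 then +1) equals the insert-getD counting step
lemma pv_step_eq (d : PySem.Dict String Int) (v : String) :
    (if d.contains v then d else d.insert v 0).modify v 0 (· + 1)
      = d.insert v (d.getD v 0 + 1) := by
  by_cases h : d.contains v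
  · simp [h, PySem.Dict.modify]
  · simp only [h, Bool.false_eq_true, if_false]
    have hn : d.items.find? (fun p => p.fst == v) = none := by
      rw [List.find?_eq_none]
      intro p hp hc
      exact h (by simp only [PySem.Dict.contains, List.any_eq_true]; exact ⟨p, hp, hc⟩)
    have hg : d.getD v 0 = 0 := by simp [PySem.Dict.getD, PySem.Dict.get?, hn]
    rw [hg]
    simp [PySem.Dict.modify, PySem.Dict.getD_insert_self, PySem.Dict.insert_insert_self]

-- A's counting loop is collections.Counter of the label list
lemma pv_counter_eq (labels : List String) :
    labels.foldl (fun d vote =>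
          (if d.contains vote then d else d.insert vote 0).modify vote 0 (· + 1))
        (PySem.Dict.mk ([] : List (String × Int)))
    = PySem.Dict.counter labels := by
  have h : labels.foldl (fun d vote =>
          (if d.contains vote then d else d.insert vote 0).modify vote 0 (· + 1))
        (PySem.Dict.mk ([] : List (String × Int)))
      = labels.foldl (fun d vote => d.insert vote (d.getD vote 0 + 1))
        (PySem.Dict.mk ([] : List (String × Int))) := by
    congr 1
    funext d v
    exact pv_step_eq d v
  rw [h]
  exact PySem.Dict.foldl_insert_getD_add_one_eq_counter labels

-- head of a single stable insertion
lemma pv_insertBy_head {α : Type} (before : α → α → Bool) (x : α) (ys : List α) :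
    (PySem.List.insertBy before x ys).head? =
      some (match ys with | [] => x | y :: _ => if before x y then x else y) := by
  cases ys with
  | nil => simp [PySem.List.insertBy]
  | cons y t =>
    by_cases h : before x y
    · simp [PySem.List.insertBy, h]
    · simp [PySem.List.insertBy, h]

-- head of the insertion-sort fold is the running first-max fold
lemma pv_head_foldl_insertBy {α : Type} (before : α → α → Bool) :
    ∀ (xs : List α) (acc : List α),
      (xs.foldl (fun a x => PySem.List.insertBy before x a) acc).head? =
        xs.foldl (fun o x => match o with
          | none => some x
          | some m => if before x m then some x else some m) acc.head? := by
  intro xs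
  induction xs with
  | nil => intro acc; rfl
  | cons x t ih =>
    intro acc
    rw [List.foldl_cons, List.foldl_cons, ih]
    congr 1
    rw [pv_insertBy_head]
    cases acc <;> simp [apply_ite some]

-- head of Python's stable reverse sort = Python's max (both take the FIRST extremal element)
lemma pv_head_sorted_rev {α : Type} (xs : List α) (key : α → Int) :
    (PySem.List.sorted xs key true).head? = PySem.List.max? xs key := by
  unfold PySem.List.sorted PySem.List.max?
  rw [pv_head_foldl_insertBy]
  simp only [if_true]
  congr 1
  funext o x
  cases o with
  | none => rfl
  | some m => simp [decide_eq_true_eq]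

lemma pv_pyGet_zero_head {α : Type} (xs : List α) : PySem.List.pyGet? xs 0 = xs.head? := by
  cases xs <;> simp [PySem.List.pyGet?, PySem.List.pyIdx?]

-- max? commutes with map (fold-state related by Option.map)
lemma pv_max?_map {α β : Type} (f : α → β) (key : β → Int) (xs : List α) :
    PySem.List.max? (xs.map f) key = (PySem.List.max? xs (fun x => key (f x))).map f := by
  unfold PySem.List.max?
  rw [List.foldl_map]
  have h : ∀ (l : List α) (acc : Option α),
      l.foldl (fun acc x => match acc with
        | none => some (f x)
        | some m => if key m < key (f x) then some (f x) else some m) (acc.map f)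
      = (l.foldl (fun acc x => match acc with
        | none => some x
        | some m => if key (f m) < key (f x) then some x else some m) acc).map f := by
    intro l
    induction l with
    | nil => intro acc; rfl
    | cons x t ih =>
      intro acc
      rw [List.foldl_cons, List.foldl_cons]
      cases acc with
      | none => exact ih (some x)
      | some m =>
        by_cases h : key (f m) < key (f x)
        · simpa [h] using ih (some x)
        · simpa [h] using ih (some m)
  simpa using h xs none

-- removing later occurrences of a value already dominated by the running max changes nothing
lemma pv_foldl_max_filter {α : Type} [BEq α] [LawfulBEq α] (key : α → Int) (a : α) :
    ∀ (t : List α) (m : α), key a ≤ key m →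
      (t.filter (fun y => !(y == a))).foldl (pvMaxStep key) (some m)
        = t.foldl (pvMaxStep key) (some m) := by
  intro t
  induction t with
  | nil => intro m _; rfl
  | cons y t ih =>
    intro m hm
    by_cases hy : y == a
    · have hya : y = a := eq_of_beq hy
      have hlt : ¬ key m < key y := by rw [hya]; omega
      simp only [List.filter_cons, hy, Bool.not_true, Bool.false_eq_true, if_false,
        List.foldl_cons, pvMaxStep, hlt, if_false]
      exact ih m hm
    · simp only [List.filter_cons, hy, Bool.not_false, if_true, List.foldl_cons, pvMaxStep]
      by_cases h : key m < key y
      · simp only [h, if_true]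
        exact ih y (by omega)
      · simp only [h, if_false]
        exact ih m hm

-- PySem.Set.add never removes an element
lemma pv_contains_add {α : Type} [BEq α] [LawfulBEq α] (s : PySem.Set α) (x z : α)
    (h : s.contains x) : (PySem.Set.add s z).contains x := by
  simp only [PySem.Set.contains, List.contains_eq_mem, decide_eq_true_eq] at h ⊢
  unfold PySem.Set.add
  split_ifs with hc
  · exact h
  · exact List.mem_append.mpr (Or.inl h)

-- once a value is in the set, its later occurrences are ignored by the ofList fold
lemma pv_foldl_add_filter {α : Type} [BEq α] [LawfulBEq α] (x : α) :
    ∀ (t : List α) (s : PySem.Set α), s.contains x →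
      (t.filter (fun z => !(z == x))).foldl PySem.Set.add s = t.foldl PySem.Set.add s := by
  intro t
  induction t with
  | nil => intro s _; rfl
  | cons z t ih =>
    intro s hs
    by_cases hz : z == x
    · have hzx : z = x := eq_of_beq hz
      have hs' : x ∈ s := by
        simpa [PySem.Set.contains, List.contains_eq_mem] using hs
      have : PySem.Set.add s z = s := by
        rw [hzx]
        simp [PySem.Set.add, PySem.Set.contains, List.contains_eq_mem, hs']
      simp only [List.filter_cons, hz, Bool.not_true, Bool.false_eq_true, if_false,
        List.foldl_cons, this]
      exact ih s hs
    · simp only [List.filter_cons, hz, Bool.not_false, if_true, List.foldl_cons]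
      exact ih (PySem.Set.add s z) (pv_contains_add s x z hs)

lemma pv_foldl_add_head {α : Type} [BEq α] [LawfulBEq α] (x : α) :
    ∀ (t : List α) (s : PySem.Set α), (∀ z ∈ t, (z == x) = false) →
      t.foldl PySem.Set.add (x :: s) = x :: t.foldl PySem.Set.add s := by
  intro t
  induction t with
  | nil => intro s _; rfl
  | cons z t ih =>
    intro s hz
    have hzx : (z == x) = false := hz z (List.mem_cons_self ..)
    have hne : ¬ z = x := by
      intro h; rw [h] at hzx; simp at hzx
    have hadd : PySem.Set.add (x :: s) z = x :: PySem.Set.add s z := by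
      by_cases hm : z ∈ s <;>
        simp [PySem.Set.add, PySem.Set.contains, List.contains_eq_mem, hne, hm]
    rw [List.foldl_cons, List.foldl_cons, hadd]
    exact ih (PySem.Set.add s z) (fun w hw => hz w (List.mem_cons_of_mem _ hw))

-- first-occurrence recursion for PySem.Set.ofList
lemma pv_ofList_cons {α : Type} [BEq α] [LawfulBEq α] (x : α) (t : List α) :
    PySem.Set.ofList (x :: t) = x :: PySem.Set.ofList (t.filter (fun z => !(z == x))) := by
  unfold PySem.Set.ofList
  rw [List.foldl_cons]
  have hadd : PySem.Set.add PySem.Set.empty x = [x] := by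
    simp [PySem.Set.add, PySem.Set.empty]
  rw [hadd]
  have h1 : t.foldl PySem.Set.add [x]
      = (t.filter (fun z => !(z == x))).foldl PySem.Set.add [x] := by
    exact (pv_foldl_add_filter x t [x] (by simp)).symm
  rw [h1]
  have h2 : ∀ z ∈ t.filter (fun z => !(z == x)), (z == x) = false := by
    intro z hz
    have := List.of_mem_filter hz
    simpa using this
  have : ([x] : List α) = x :: PySem.Set.empty := rfl
  rw [this, pv_foldl_add_head x _ PySem.Set.empty h2]

-- the running-max fold over the deduplicated list equals the fold over the list itself
lemma pv_foldl_max_ofList {α : Type} [BEq α] [LawfulBEq α] (key : α → Int) :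
    ∀ (n : Nat) (t : List α), t.length ≤ n → ∀ (m : α),
      (PySem.Set.ofList t).foldl (pvMaxStep key) (some m) = t.foldl (pvMaxStep key) (some m) := by
  intro n
  induction n with
  | zero =>
    intro t ht m
    have : t = [] := List.eq_nil_of_length_eq_zero (Nat.le_zero.mp ht)
    subst this; rfl
  | succ n ih =>
    intro t ht m
    cases t with
    | nil => rfl
    | cons y t' =>
      rw [pv_ofList_cons, List.foldl_cons, List.foldl_cons]
      have hstep : pvMaxStep key (some m) y
          = some (if key m < key y then y else m) := by
        unfold pvMaxStep
        split_ifs with h <;> simp [h]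
      rw [hstep]
      have hlen : (t'.filter (fun z => !(z == y))).length ≤ n := by
        have := List.length_filter_le (fun z => !(z == y)) t'
        simp at ht
        omega
      rw [ih _ hlen]
      have hky : key y ≤ key (if key m < key y then y else m) := by
        split_ifs with h <;> omega
      exact pv_foldl_max_filter key y t' _ hky

-- Python's max over the distinct elements = Python's max over the list (key respects equality)
lemma pv_max?_ofList {α : Type} [BEq α] [LawfulBEq α] (key : α → Int) (xs : List α) :
    PySem.List.max? (PySem.Set.ofList xs) key = PySem.List.max? xs key := by
  cases xs with
  | nil => rfl
  | cons x t =>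
    show (PySem.Set.ofList (x :: t)).foldl (pvMaxStep key) none
        = (x :: t).foldl (pvMaxStep key) none
    rw [pv_ofList_cons, List.foldl_cons, List.foldl_cons]
    show (PySem.Set.ofList (t.filter (fun z => !(z == x)))).foldl (pvMaxStep key) (some x)
        = t.foldl (pvMaxStep key) (some x)
    rw [pv_foldl_max_ofList key (t.filter (fun z => !(z == x))).length _ le_rfl x]
    exact pv_foldl_max_filter key x t x le_rfl

-- B's count-scan over the tail equals the running first-max fold with key = total count
lemma pv_scan_eq (labels : List String) :
    ∀ (t : List String) (b : String),
      (t.foldl (fun st lab =>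
          let c := PySem.List.count labels lab
          if st.2 < c then (lab, c) else st) (b, PySem.List.count labels b)).1
      = (t.foldl (pvMaxStep (fun k => ((PySem.List.count labels k : Nat) : Int))) (some b)).getD "" := by
  intro t
  induction t with
  | nil => intro b; rfl
  | cons y t ih =>
    intro b
    rw [List.foldl_cons, List.foldl_cons]
    by_cases h : PySem.List.count labels b < PySem.List.count labels y
    · have h' : ((PySem.List.count labels b : Nat) : Int) < ((PySem.List.count labels y : Nat) : Int) := by
        exact_mod_cast h
      simp only [pvMaxStep, h, h', if_true]
      exact ih y
    · have h' : ¬ ((PySem.List.count labels b : Nat) : Int) < ((PySem.List.count labels y : Nat) : Int) := by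
        exact_mod_cast h
      simp only [pvMaxStep, h, h', if_false]
      exact ih b

-- the two per-dataset labels agree
lemma pv_label_eq (dataSet : List (List String)) : pvLabelA dataSet = pvMajorityB dataSet := by
  show ((PySem.List.pyGet? (PySem.List.sorted
      ((dataSet.map (fun ex => (PySem.List.pyGet? ex (-1)).getD "")).foldl (fun d vote =>
          (if d.contains vote then d else d.insert vote 0).modify vote 0 (· + 1))
        (PySem.Dict.mk ([] : List (String × Int)))).items (fun p => p.2) true) 0).getD ("", 0)).1
    = ((dataSet.map (fun ex => (PySem.List.pyGet? ex (-1)).getD "")).foldl (fun st lab =>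
        if st.2 < PySem.List.count (dataSet.map (fun ex => (PySem.List.pyGet? ex (-1)).getD "")) lab
        then (lab, PySem.List.count (dataSet.map (fun ex => (PySem.List.pyGet? ex (-1)).getD "")) lab)
        else st)
      ((PySem.List.pyGet? (dataSet.map (fun ex => (PySem.List.pyGet? ex (-1)).getD "")) 0).getD "",
        PySem.List.count (dataSet.map (fun ex => (PySem.List.pyGet? ex (-1)).getD ""))
          ((PySem.List.pyGet? (dataSet.map (fun ex => (PySem.List.pyGet? ex (-1)).getD "")) 0).getD ""))).1
  generalize dataSet.map (fun ex => (PySem.List.pyGet? ex (-1)).getD "") = labels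
  rw [pv_counter_eq, pv_pyGet_zero_head, pv_head_sorted_rev, PySem.Dict.items_counter,
    pv_max?_map]
  cases labels with
  | nil => rfl
  | cons l0 t =>
    have hcnt : (fun k => ((List.count k (l0 :: t) : Nat) : Int))
        = (fun k => ((PySem.List.count (l0 :: t) k : Nat) : Int)) := by
      funext k; simp [PySem.List.count]
    rw [hcnt, pv_max?_ofList]
    have hmax : PySem.List.max? (l0 :: t) (fun k => ((PySem.List.count (l0 :: t) k : Nat) : Int))
        = t.foldl (pvMaxStep (fun k => ((PySem.List.count (l0 :: t) k : Nat) : Int))) (some l0) := rfl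
    rw [hmax]
    have hget : PySem.List.pyGet? (l0 :: t) 0 = some l0 := by
      rw [pv_pyGet_zero_head]; rfl
    rw [hget]
    simp only [Option.getD_some, List.foldl_cons, lt_irrefl, if_false]
    rw [pv_scan_eq (l0 :: t) t l0]
    cases htf : t.foldl (pvMaxStep (fun k => ((PySem.List.count (l0 :: t) k : Nat) : Int))) (some l0) with
    | none =>
      exfalso
      have hne : ∀ (l : List String) (m : String),
          l.foldl (pvMaxStep (fun k => ((PySem.List.count (l0 :: t) k : Nat) : Int))) (some m) ≠ none := by
        intro l
        induction l with
        | nil => intro m h; simp at h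
        | cons y l ihl =>
          intro m
          rw [List.foldl_cons]
          have hstep : pvMaxStep (fun k => ((PySem.List.count (l0 :: t) k : Nat) : Int)) (some m) y
              = some (if ((PySem.List.count (l0 :: t) m : Nat) : Int)
                  < ((PySem.List.count (l0 :: t) y : Nat) : Int) then y else m) := by
            simp only [pvMaxStep]
            split_ifs with h <;> rfl
          rw [hstep]
          exact ihl _
      exact hne t l0 htf
    | some m => simp

-- Nat-level list of the positions where q holds
def pvNatIdx {α : Type} (q : α → Bool) : List α → List Nat
  | [] => []
  | x :: l => (if q x then [0] else []) ++ (pvNatIdx q l).map (· + 1)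

lemma pvNatIdx_map {α β : Type} (q : β → Bool) (f : α → β) (l : List α) :
    pvNatIdx q (l.map f) = pvNatIdx (fun x => q (f x)) l := by
  induction l with
  | nil => rfl
  | cons x t ih => simp [pvNatIdx, ih]

-- find_all_index is pvNatIdx (shifted by the enumerate start)
lemma pv_enum_filter_idx {α : Type} (q : α → Bool) (l : List α) :
    ∀ s : Int, ((PySem.List.enumerate l s).filter (fun p => q p.2)).map (·.1)
      = List.map (fun n : Nat => (n : Int) + s) (pvNatIdx q l) := by
  induction l with
  | nil => intro s; simp [PySem.List.enumerate_nil, pvNatIdx]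
  | cons x t ih =>
    intro s
    rw [PySem.List.enumerate_cons]
    by_cases h : q x
    · simp only [pvNatIdx, h, if_true, List.filter_cons, List.map_cons, ih (s + 1),
        List.singleton_append, List.map_map]
      refine List.cons_eq_cons.mpr ⟨by simp, ?_⟩
      apply List.map_congr_left; intro n _; simp [Function.comp]; omega
    · simp only [pvNatIdx, h, if_false, List.filter_cons, List.nil_append, ih (s + 1),
        List.map_map, Bool.false_eq_true]
      apply List.map_congr_left; intro n _; simp [Function.comp]; omega

-- deleting at index n+1 in x :: ys keeps x and deletes at n in ys, through a whole fold
lemma pv_foldl_erase_shift {α : Type} (ns : List Nat) :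
    ∀ (x : α) (ys : List α),
      (ns.map (· + 1)).foldl (fun cur n => cur.eraseIdx n) (x :: ys)
        = x :: ns.foldl (fun cur n => cur.eraseIdx n) ys := by
  induction ns with
  | nil => intro x ys; rfl
  | cons n t ih =>
    intro x ys
    simp only [List.map_cons, List.foldl_cons, List.eraseIdx_cons_succ]
    exact ih x _

-- deleting the q-positions back to front is filtering on ¬q
lemma pv_delete_rev_eq_filter {α : Type} (q : α → Bool) :
    ∀ l : List α, (pvNatIdx q l).reverse.foldl (fun cur n => cur.eraseIdx n) l
      = l.filter (fun x => !q x) := by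
  intro l
  induction l with
  | nil => simp [pvNatIdx]
  | cons x t ih =>
    by_cases h : q x
    · simp only [pvNatIdx, h, if_true, List.singleton_append, List.reverse_cons,
        List.map_reverse.symm]
      rw [List.foldl_append, pv_foldl_erase_shift]
      simp [ih, h]
    · simp only [pvNatIdx, h, if_false, List.nil_append, Bool.false_eq_true]
      rw [← List.map_reverse, pv_foldl_erase_shift]
      simp [ih, h]

-- ===== VERDICT (by name: the statement is the Claim_ definition above) =====
theorem cut_leaf_spec : Claim_equal_cut_leaf := by
  intro item value _ _
  unfold Spec_cut_leaf cut_leaf cut_leaf_alt find_all_index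
  simp only [PySem.List.foldl_append_singleton_eq_map, List.nil_append]
  have hlab : (item.map fun dataSet =>
      ((PySem.List.pyGet? (PySem.List.sorted
        ((dataSet.map (fun ex => (PySem.List.pyGet? ex (-1)).getD "")).foldl (fun d vote =>
          (if d.contains vote then d else d.insert vote 0).modify vote 0 (· + 1))
          (PySem.Dict.mk ([] : List (String × Int)))).items (fun p => p.2) true) 0).getD ("", 0)).1)
      = item.map pvLabelA := rfl
  rw [hlab, pv_enum_filter_idx (fun lbl => lbl == value) (item.map pvLabelA) 0, pvNatIdx_map, PySem.List.slice?_none_none_neg_one]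
  simp only [Option.getD_some, ← List.map_reverse, List.foldl_map, Int.add_zero,
    Int.toNat_natCast]
  rw [pv_delete_rev_eq_filter,
    PySem.List.foldl_append_if (fun ds => pvMajorityB ds != value) (fun ds => ds) item []]
  simp only [List.nil_append, List.map_id_fun', id]
  apply List.filter_congr
  intro ds _
  simp [pv_label_eq, bne]
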